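-- pv_equiv track=rewrite | github.com/ltfyle/CS3130_Project1_Eval_Polynomials | BruteForceAlgorithm.py | BruteForceAlgorithm
-- ===== SOURCE A (Python) =====
-- def BruteForceAlgorithm(x: int, n: int):
--
--     p = 1
--
--     for i in range(0,n+1):
--
--         power = 1
--         for j in range(1,i+1):
--                 power = power * x
--
--
--         p = p + (i*power)
--
--
--     return p
-- ===== SOURCE B (Python) =====
-- def BruteForceAlgorithm(x: int, n: int):
--     s = 0
--     for i in range(n, 0, -1):
--         s = s * x + i
--     return 1 + x * s
-- ===== Notes on version B (the rewrite author's own statement) =====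
-- stated objective: faster
-- what changed: Horner's method: one reverse pass with a multiply-add accumulator replaces the nested power-recomputation loop.
import Mathlib
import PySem

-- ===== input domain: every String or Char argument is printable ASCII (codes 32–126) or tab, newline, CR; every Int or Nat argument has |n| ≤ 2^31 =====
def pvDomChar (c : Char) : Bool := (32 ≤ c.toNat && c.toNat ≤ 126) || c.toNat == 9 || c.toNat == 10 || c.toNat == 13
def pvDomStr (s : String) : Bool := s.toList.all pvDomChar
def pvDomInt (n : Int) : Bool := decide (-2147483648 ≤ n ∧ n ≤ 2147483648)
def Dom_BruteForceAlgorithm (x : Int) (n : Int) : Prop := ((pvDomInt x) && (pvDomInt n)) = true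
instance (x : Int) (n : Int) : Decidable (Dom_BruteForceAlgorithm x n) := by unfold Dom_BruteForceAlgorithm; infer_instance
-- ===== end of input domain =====

-- B replaces A's nested power-recomputation loop by Horner's method (single reverse pass).

-- ===== PORT A =====
def BruteForceAlgorithm (x : Int) (n : Int) : Int :=
  (PySem.List.pyRange 0 (n + 1) 1).foldl
    (fun p i =>
      let power := (PySem.List.pyRange 1 (i + 1) 1).foldl (fun pw _ => pw * x) 1
      p + i * power)
    1

-- ===== PORT B =====
def BruteForceAlgorithm_alt (x : Int) (n : Int) : Int :=
  let s := (PySem.List.pyRange n 0 (-1)).foldl (fun s i => s * x + i) 0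
  1 + x * s

-- ===== PRECONDITION & SPEC =====
def Spec_BruteForceAlgorithm (x : Int) (n : Int) (out : Int) : Prop := out = BruteForceAlgorithm_alt x n
instance (x : Int) (n : Int) (out : Int) : Decidable (Spec_BruteForceAlgorithm x n out) := by unfold Spec_BruteForceAlgorithm; infer_instance

-- ===== CLAIM (what is proved, stated in full; the proofs are below) =====
def Claim_equal_BruteForceAlgorithm : Prop := ∀ (x : Int) (n : Int), Dom_BruteForceAlgorithm x n → Spec_BruteForceAlgorithm x n (BruteForceAlgorithm x n)

-- ===== LEMMAS AND PROOFS =====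

-- spec polynomial t x m = Σ_{i=1..m} i·x^(i-1)
def pvT (x : Int) : Nat → Int
  | 0 => 0
  | m + 1 => (m + 1) * x ^ m + pvT x m

-- A's inner loop computes x^i
theorem pvPower_eq (x : Int) (i : Int) (hi : 0 ≤ i) :
    (PySem.List.pyRange 1 (i + 1) 1).foldl (fun pw _ => pw * x) 1 = x ^ i.toNat := by
  obtain ⟨m, rfl⟩ := Int.eq_ofNat_of_zero_le hi
  induction m with
  | zero => simp [PySem.List.pyRange_one_eq_nil]
  | succ k ih =>
      push_cast
      rw [PySem.List.pyRange_one_succ_right (by omega), List.foldl_append]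
      push_cast at ih
      rw [ih (by omega)]
      rw [show ((k : Int) + 1).toNat = k + 1 by omega, show ((k : Int)).toNat = k by omega]
      simp [pow_succ]

-- A's outer loop, for nonneg n, equals 1 + x * pvT x n
theorem pvA_eq (x : Int) (m : Nat) :
    BruteForceAlgorithm x (m : Int) = 1 + x * pvT x m := by
  induction m with
  | zero =>
      unfold BruteForceAlgorithm
      rw [PySem.List.pyRange_one_cons (by norm_num), PySem.List.pyRange_one_eq_nil (by norm_num)]
      simp [pvT]
  | succ k ih =>
      unfold BruteForceAlgorithm at *
      push_cast
      rw [PySem.List.pyRange_one_succ_right (by omega), List.foldl_append]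
      simp only [List.foldl_cons, List.foldl_nil]
      push_cast at ih
      rw [ih, pvPower_eq x ((k : Int) + 1) (by omega), pvT]
      ring_nf
      rw [show ((1:Int) + (k : Int)).toNat = k + 1 by omega]
      ring

-- B's Horner loop with general accumulator
theorem pvB_fold (x : Int) (m : Nat) (s0 : Int) :
    (PySem.List.pyRange (m : Int) 0 (-1)).foldl (fun s i => s * x + i) s0
      = s0 * x ^ m + pvT x m := by
  induction m generalizing s0 with
  | zero => simp [PySem.List.pyRange_neg_one_eq_nil, pvT]
  | succ k ih =>
      push_cast
      rw [PySem.List.pyRange_neg_one_cons (by omega)]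
      simp only [List.foldl_cons]
      rw [show ((k : Int) + 1 - 1) = (k : Int) by ring, ih]
      simp [pvT, pow_succ]
      ring

theorem pvNeg_A (x : Int) (n : Int) (hn : n < 0) : BruteForceAlgorithm x n = 1 := by
  unfold BruteForceAlgorithm
  rw [PySem.List.pyRange_one_eq_nil (by omega)]
  rfl

theorem pvNeg_B (x : Int) (n : Int) (hn : n < 0) : BruteForceAlgorithm_alt x n = 1 := by
  unfold BruteForceAlgorithm_alt
  rw [PySem.List.pyRange_neg_one_eq_nil (by omega)]
  simp

-- ===== VERDICT (by name: the statement is the Claim_ definition above) =====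
theorem BruteForceAlgorithm_spec : Claim_equal_BruteForceAlgorithm := by
  intro x n _
  unfold Spec_BruteForceAlgorithm
  rcases lt_or_ge n 0 with h | h
  · rw [pvNeg_A x n h, pvNeg_B x n h]
  · obtain ⟨m, rfl⟩ := Int.eq_ofNat_of_zero_le h
    rw [pvA_eq]
    unfold BruteForceAlgorithm_alt
    rw [pvB_fold]
    ring
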